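-- pv_equiv track=rewrite | github.com/Rodeet/sapr | task1/task.py | get_all_siblings
-- ===== SOURCE A (Python) =====
-- def get_all_siblings(adj, obj):
--     siblings = []
--     parent = None
--     for a in adj:
--         if a[1] == obj:
--             parent = a[0]
--             break
--     for a in adj:
--         if a[0] == parent and a[1] != obj:
--             siblings.append(a[1])
--     return siblings
-- ===== SOURCE B (Python) =====
-- def get_all_siblings(adj, obj):
--     child_to_parent = {}
--     parent_to_children = {}
--     for a in adj:
--         child_to_parent.setdefault(a[1], a[0])
--         parent_to_children.setdefault(a[0], []).append(a[1])
--     parent = child_to_parent.get(obj)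
--     if parent is None:
--         return []
--     return [c for c in parent_to_children.get(parent, []) if c != obj]
-- ===== Notes on version B (the rewrite author's own statement) =====
-- stated objective: idiomatic
-- what changed: B replaces A's two sequential scans (a find-parent loop with break, then a filter loop) by a single pass that builds a child->parent index (first occurrence wins) and a parent->children grouping, then answers by dictionary lookup.
import Mathlib
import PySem

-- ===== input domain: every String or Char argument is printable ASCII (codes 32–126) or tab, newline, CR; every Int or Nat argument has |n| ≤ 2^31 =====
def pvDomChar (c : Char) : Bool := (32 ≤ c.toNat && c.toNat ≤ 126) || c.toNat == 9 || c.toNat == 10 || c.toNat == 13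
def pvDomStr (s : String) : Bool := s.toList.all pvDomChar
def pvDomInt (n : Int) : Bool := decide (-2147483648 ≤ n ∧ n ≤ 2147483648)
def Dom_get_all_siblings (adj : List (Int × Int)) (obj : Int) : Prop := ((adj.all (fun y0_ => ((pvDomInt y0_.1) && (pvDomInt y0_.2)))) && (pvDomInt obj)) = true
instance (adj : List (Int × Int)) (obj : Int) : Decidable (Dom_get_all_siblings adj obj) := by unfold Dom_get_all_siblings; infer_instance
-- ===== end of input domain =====

-- B replaces A's two sequential scans by one pass building a child->parent index and a
-- parent->children grouping, answering by lookup (same O(n) cost, more idiomatic).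


-- ===== PORT A =====
-- first loop of A: scan for the first edge whose child is obj; Python's `parent = None` / break
def pvFindParent : List (Int × Int) → Int → Option Int
  | [], _ => none
  | a :: rest, obj => if a.2 == obj then some a.1 else pvFindParent rest obj

def get_all_siblings (adj : List (Int × Int)) (obj : Int) : List Int :=
  let parent := pvFindParent adj obj
  -- second loop: `a[0] == parent` is False in Python whenever parent is None (ints vs None)
  adj.foldl (fun siblings a =>
    if parent == some a.1 && a.2 != obj then siblings ++ [a.2] else siblings) []

-- ===== PORT B =====
def get_all_siblings_alt (adj : List (Int × Int)) (obj : Int) : List Int :=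
  let st := adj.foldl
    (fun (st : PySem.Dict Int Int × PySem.Dict Int (List Int)) a =>
      (st.1.setdefault a.2 a.1, st.2.modify a.1 [] (· ++ [a.2])))
    (PySem.Dict.empty, PySem.Dict.empty)
  match st.1.get? obj with
  | none => []
  | some p => (st.2.getD p []).filter (fun c => c != obj)

-- ===== PRECONDITION & SPEC =====
def Spec_get_all_siblings (adj : List (Int × Int)) (obj : Int) (out : List Int) : Prop := out = get_all_siblings_alt adj obj
instance (adj : List (Int × Int)) (obj : Int) (out : List Int) : Decidable (Spec_get_all_siblings adj obj out) := by unfold Spec_get_all_siblings; infer_instance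

-- ===== CLAIM (what is proved, stated in full; the proofs are below) =====
def Claim_equal_get_all_siblings : Prop := ∀ (adj : List (Int × Int)) (obj : Int), Dom_get_all_siblings adj obj → Spec_get_all_siblings adj obj (get_all_siblings adj obj)

-- ===== LEMMAS AND PROOFS =====
-- child_to_parent lookup after the setdefault loop = A's first-match scan
theorem get?_foldl_setdefault (adj : List (Int × Int)) (obj : Int) (d : PySem.Dict Int Int) :
    (adj.foldl (fun d (a : Int × Int) => d.setdefault a.2 a.1) d).get? obj
      = ((d.get? obj).or (pvFindParent adj obj)) := by
  induction adj generalizing d with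
  | nil => simp [pvFindParent]
  | cons a rest ih =>
    simp only [List.foldl_cons, pvFindParent, ih]
    by_cases h : a.2 = obj
    · subst h
      rw [PySem.Dict.get?_setdefault_self]
      cases hd : d.get? a.2 <;> simp
    · rw [PySem.Dict.get?_setdefault_of_ne]
      · simp [h]
      · exact Ne.symm h

-- ===== VERDICT (by name: the statement is the Claim_ definition above) =====
theorem get_all_siblings_spec : Claim_equal_get_all_siblings := by
  intro adj obj _
  unfold Spec_get_all_siblings get_all_siblings get_all_siblings_alt
  rw [PySem.List.foldl_prod_mk
        (f := fun (d : PySem.Dict Int Int) (a : Int × Int) => d.setdefault a.2 a.1)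
        (g := fun (d : PySem.Dict Int (List Int)) (a : Int × Int) => d.modify a.1 [] (· ++ [a.2]))]
  simp only [get?_foldl_setdefault, PySem.Dict.get?_empty, Option.or]
  cases hp : pvFindParent adj obj with
  | none =>
    simp only []
    rw [PySem.List.foldl_append_if (p := fun a : Int × Int => none == some a.1 && a.2 != obj)
        (f := fun a : Int × Int => a.2)]
    simp
  | some p =>
    simp only []
    rw [PySem.List.foldl_append_if (p := fun a : Int × Int => some p == some a.1 && a.2 != obj)
        (f := fun a : Int × Int => a.2)]
    rw [PySem.Dict.getD_foldl_modify_append]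
    simp only [PySem.Dict.getD_empty, List.nil_append, List.filter_map]
    rw [List.filter_filter]
    congr 1
    apply List.filter_congr
    intro a _
    simp only [Function.comp]
    by_cases h1 : a.1 = p
    · subst h1
      simp [Bool.and_comm]
    · have h1' : ¬ p = a.1 := fun h => h1 (Eq.symm h)
      have h2' : ¬ (some p : Option Int) = some a.1 := by simpa using h1'
      rw [beq_eq_false_iff_ne.mpr h2', beq_eq_false_iff_ne.mpr h1]
      simp
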